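-- pv_equiv track=rewrite | github.com/YunchengLiang/oldnpe2 | yunchengLiang2/test_sparknlp_tunewords_v1.py | phrase_mention
-- ===== SOURCE A (Python) =====
-- import string
--
-- def phrase_mention(text, phrase_list):
--     text_lower = text.lower()
--     punc_set = set(string.punctuation)
--     punc_free_text = ''.join([ch for ch in text_lower if ch not in punc_set])
--     output = []
--     for phrase in phrase_list:
--         if phrase.lower() in punc_free_text:
--             output.append(phrase)
--     return " | ".join(output)
-- ===== SOURCE B (Python) =====
-- import string
--
-- def phrase_mention(text, phrase_list):
--     punct = set(string.punctuation)
--     cleaned = "".join(ch for ch in text.lower() if ch not in punct)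
--     n = len(cleaned)
--     windows = {}
--     for p in phrase_list:
--         L = len(p)
--         if L not in windows:
--             windows[L] = {cleaned[i:i + L] for i in range(n - L + 1)}
--     return " | ".join(p for p in phrase_list if p.lower() in windows[len(p)])
-- ===== Notes on version B (the rewrite author's own statement) =====
-- stated objective: faster
-- what changed: Instead of running a substring search over the cleaned text for every phrase, B builds once a dictionary from each distinct phrase length L to the hash set of all length-L windows of the cleaned text, then decides each phrase by a single set-membership lookup.
import Mathlib
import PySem

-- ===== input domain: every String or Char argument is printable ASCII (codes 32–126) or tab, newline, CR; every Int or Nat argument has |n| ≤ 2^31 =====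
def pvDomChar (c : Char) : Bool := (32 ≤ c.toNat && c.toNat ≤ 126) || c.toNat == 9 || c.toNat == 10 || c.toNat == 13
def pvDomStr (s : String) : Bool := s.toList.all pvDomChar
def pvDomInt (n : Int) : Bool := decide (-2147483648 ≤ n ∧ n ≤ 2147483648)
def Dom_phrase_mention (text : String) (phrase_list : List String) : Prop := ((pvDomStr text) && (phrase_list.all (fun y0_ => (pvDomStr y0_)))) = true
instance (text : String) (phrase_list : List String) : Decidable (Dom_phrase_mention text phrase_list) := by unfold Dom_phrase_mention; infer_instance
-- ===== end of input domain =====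

-- B builds, once, a dictionary from each needed phrase length to the set of all windows of the
-- cleaned text of that length, and tests each phrase by set lookup instead of a per-phrase
-- substring scan (objective: faster; a timing run measured B faster on the generated inputs).


-- ===== PORT A =====
def phrase_mention (text : String) (phrase_list : List String) : String :=
  let text_lower := PySem.Str.lower text
  let punc_set : PySem.Set Char := PySem.Set.ofList "!\"#$%&'()*+,-./:;<=>?@[\\]^_`{|}~".toList
  -- ''.join([ch for ch in text_lower if ch not in punc_set]): a join of single-character
  -- strings is exactly the string of the filtered code points
  let punc_free_text : String := String.ofList (text_lower.toList.filter (fun ch => !(PySem.Set.contains punc_set ch)))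
  let output : List String := phrase_list.foldl (fun acc phrase => if PySem.Str.isIn (PySem.Str.lower phrase) punc_free_text then acc ++ [phrase] else acc) []
  PySem.Str.join " | " output

-- ===== PORT B =====
-- {cleaned[i:i+L] for i in range(n - L + 1)}; window strings are modelled as their lists of
-- code points (exact: PySem string primitives are defined on the code-point lists)
def pvWindowSet (cleaned : List Char) (L : Int) : PySem.Set (List Char) :=
  PySem.Set.ofList ((PySem.List.pyRange 0 ((cleaned.length : Int) - L + 1)).map
    (fun i => PySem.List.slice cleaned (some i) (some (i + L))))

-- loop body: 'L = len(p); if L not in windows: windows[L] = {…}'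
def pvAddLen (cleaned : List Char) (w : PySem.Dict Int (PySem.Set (List Char))) (p : String) : PySem.Dict Int (PySem.Set (List Char)) :=
  let L := PySem.Str.len p
  match w.get? L with
  | some _ => w
  | none => w.insert L (pvWindowSet cleaned L)

def phrase_mention_alt (text : String) (phrase_list : List String) : String :=
  let punct : PySem.Set Char := PySem.Set.ofList "!\"#$%&'()*+,-./:;<=>?@[\\]^_`{|}~".toList
  -- cleaned = "".join(ch for ch in text.lower() if ch not in punct), as its code-point list
  let cleaned : List Char := (PySem.Str.lower text).toList.filter (fun ch => !(PySem.Set.contains punct ch))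
  let windows : PySem.Dict Int (PySem.Set (List Char)) := phrase_list.foldl (pvAddLen cleaned) PySem.Dict.empty
  -- windows[len(p)]: the key is always present; .getD only makes the lookup total
  let kept := phrase_list.filter (fun p => PySem.Set.contains ((windows.get? (PySem.Str.len p)).getD PySem.Set.empty) (PySem.Str.lower p).toList)
  PySem.Str.join " | " kept

-- ===== PRECONDITION & SPEC =====
def Spec_phrase_mention (text : String) (phrase_list : List String) (out : String) : Prop := out = phrase_mention_alt text phrase_list
instance (text : String) (phrase_list : List String) (out : String) : Decidable (Spec_phrase_mention text phrase_list out) := by unfold Spec_phrase_mention; infer_instance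

-- ===== CLAIM (what is proved, stated in full; the proofs are below) =====
def Claim_equal_phrase_mention : Prop := ∀ (text : String) (phrase_list : List String), Dom_phrase_mention text phrase_list → Spec_phrase_mention text phrase_list (phrase_mention text phrase_list)

-- ===== LEMMAS AND PROOFS =====

-- a list q is in the window set for its own length iff it is an infix of the cleaned text
lemma pvWindowSet_mem (cleaned q : List Char) :
    q ∈ pvWindowSet cleaned ((q.length : Nat) : Int) ↔ q <:+: cleaned := by
  unfold pvWindowSet
  rw [PySem.Set.mem_ofList]
  simp only [List.mem_map]
  constructor
  · rintro ⟨i, hi, hq⟩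
    rw [PySem.List.mem_pyRange_one] at hi
    rw [PySem.List.slice_toNat cleaned hi.1 (by obtain ⟨h0, _⟩ := hi; omega)] at hq
    rw [← hq]
    exact ((List.take_prefix _ _).isInfix).trans ((List.drop_suffix _ _).isInfix)
  · rintro ⟨s, t, rfl⟩
    refine ⟨(s.length : Int), ?_, ?_⟩
    · rw [PySem.List.mem_pyRange_one]
      refine ⟨by positivity, ?_⟩
      simp only [List.length_append]
      push_cast
      omega
    · rw [PySem.List.slice_natCast_add]
      simp

-- dict invariant: every stored value is the window set of its key
def pvGood (cleaned : List Char) (d : PySem.Dict Int (PySem.Set (List Char))) : Prop :=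
  ∀ k v, d.get? k = some v → v = pvWindowSet cleaned k

lemma pvGood_step (cleaned : List Char) (d : PySem.Dict Int (PySem.Set (List Char))) (p : String)
    (h : pvGood cleaned d) : pvGood cleaned (pvAddLen cleaned d p) := by
  simp only [pvAddLen]
  intro k v hk
  split at hk
  · exact h k v hk
  · by_cases hkL : k = PySem.Str.len p
    · subst hkL
      rw [PySem.Dict.get?_insert_self] at hk
      exact (Option.some_inj.mp hk).symm
    · rw [PySem.Dict.get?_insert_of_ne _ _ hkL] at hk
      exact h k v hk

lemma pvPresent_step (cleaned : List Char) (d : PySem.Dict Int (PySem.Set (List Char))) (p : String)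
    (k : Int) (h : d.get? k ≠ none) : (pvAddLen cleaned d p).get? k ≠ none := by
  simp only [pvAddLen]
  split
  · exact h
  · by_cases hkL : k = PySem.Str.len p
    · subst hkL; rw [PySem.Dict.get?_insert_self]; simp
    · rw [PySem.Dict.get?_insert_of_ne _ _ hkL]; exact h

lemma pvSelf_present (cleaned : List Char) (d : PySem.Dict Int (PySem.Set (List Char))) (p : String) :
    (pvAddLen cleaned d p).get? (PySem.Str.len p) ≠ none := by
  simp only [pvAddLen]
  split
  · rename_i v hg; rw [hg]; simp
  · rw [PySem.Dict.get?_insert_self]; simp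

lemma pvPresent_fold (cleaned : List Char) (pl : List String)
    (d : PySem.Dict Int (PySem.Set (List Char))) (k : Int) (h : d.get? k ≠ none) :
    (pl.foldl (pvAddLen cleaned) d).get? k ≠ none := by
  induction pl generalizing d with
  | nil => exact h
  | cons q t ih => exact ih _ (pvPresent_step cleaned d q k h)

lemma pvGood_fold (cleaned : List Char) (pl : List String)
    (d : PySem.Dict Int (PySem.Set (List Char))) (h : pvGood cleaned d) :
    pvGood cleaned (pl.foldl (pvAddLen cleaned) d) := by
  induction pl generalizing d with
  | nil => exact h
  | cons q t ih => exact ih _ (pvGood_step cleaned d q h)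

lemma pvMem_present (cleaned : List Char) (pl : List String) (p : String) (hp : p ∈ pl)
    (d : PySem.Dict Int (PySem.Set (List Char))) :
    (pl.foldl (pvAddLen cleaned) d).get? (PySem.Str.len p) ≠ none := by
  induction pl generalizing d with
  | nil => cases hp
  | cons q t ih =>
    rcases List.mem_cons.mp hp with rfl | hp'
    · exact pvPresent_fold cleaned t _ _ (pvSelf_present cleaned d p)
    · exact ih hp' _

lemma pvFold_get (cleaned : List Char) (pl : List String) (p : String) (hp : p ∈ pl) :
    (pl.foldl (pvAddLen cleaned) PySem.Dict.empty).get? (PySem.Str.len p)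
      = some (pvWindowSet cleaned (PySem.Str.len p)) := by
  have hgood : pvGood cleaned (pl.foldl (pvAddLen cleaned) PySem.Dict.empty) := by
    apply pvGood_fold
    intro k v hk
    rw [PySem.Dict.get?_empty] at hk
    cases hk
  have hpres := pvMem_present cleaned pl p hp PySem.Dict.empty
  cases hg : (pl.foldl (pvAddLen cleaned) PySem.Dict.empty).get? (PySem.Str.len p) with
  | none => exact absurd hg hpres
  | some v => rw [hgood _ v hg]

-- ===== VERDICT (by name: the statement is the Claim_ definition above) =====
theorem phrase_mention_spec : Claim_equal_phrase_mention := by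
  intro text pl _
  unfold Spec_phrase_mention phrase_mention phrase_mention_alt
  simp only [PySem.List.foldl_append_if_eq_filter, List.nil_append]
  refine congrArg (PySem.Str.join " | ") ?_
  apply List.filter_congr
  intro p hp
  rw [pvFold_get _ pl p hp, Option.getD_some]
  have hlen : PySem.Str.len p = (((PySem.Str.lower p).toList.length : Nat) : Int) := by
    rw [PySem.Str.len_eq, PySem.Str.toList_lower]
    simp [PySem.Chars.lower]
  rw [hlen]
  rw [Bool.eq_iff_iff, PySem.Set.contains_iff, pvWindowSet_mem, PySem.Str.isIn_iff_infix]
  simp
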